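-- pv_equiv track=rewrite | github.com/PGSammy/backjoon_coding_test | silver_4/1235.py | find_min_digits
-- ===== SOURCE A (Python) =====
-- def find_min_digits(n, numbers):
--     length = len(numbers[0])
--
--     for k in range(1, length + 1):
--         number_set = set()
--         for num in numbers:
--             number_set.add(num[-k:])
--
--         if len(number_set) == n:
--             return k
--
--     return length
-- ===== SOURCE B (Python) =====
-- def find_min_digits(n, numbers):
--     length = len(numbers[0])
--
--     def cnt(k):
--         suffixes = set()
--         for num in numbers:
--             suffixes.add(num[-k:])
--         return len(suffixes)
--
--     # cnt is non-decreasing in k, so the k with cnt(k) == n form one contiguous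
--     # block: binary-search the first k with cnt(k) >= n, then check it.
--     lo, hi = 1, length + 1
--     while lo < hi:
--         mid = (lo + hi) // 2
--         if cnt(mid) >= n:
--             hi = mid
--         else:
--             lo = mid + 1
--
--     if lo <= length and cnt(lo) == n:
--         return lo
--     return length
-- ===== Notes on version B (the rewrite author's own statement) =====
-- stated objective: alternative
-- what changed: Replaces A's linear scan over suffix lengths by a binary search for the first length whose distinct-suffix count reaches n (the count is non-decreasing in the suffix length), followed by one equality check; intended as faster (fewer cnt evaluations), measured ~1.5x at the largest size but not consistently confirmed.
-- outside the precondition, e.g. on find_min_digits(0, []): A raises IndexError, B raises IndexError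
import Mathlib
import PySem

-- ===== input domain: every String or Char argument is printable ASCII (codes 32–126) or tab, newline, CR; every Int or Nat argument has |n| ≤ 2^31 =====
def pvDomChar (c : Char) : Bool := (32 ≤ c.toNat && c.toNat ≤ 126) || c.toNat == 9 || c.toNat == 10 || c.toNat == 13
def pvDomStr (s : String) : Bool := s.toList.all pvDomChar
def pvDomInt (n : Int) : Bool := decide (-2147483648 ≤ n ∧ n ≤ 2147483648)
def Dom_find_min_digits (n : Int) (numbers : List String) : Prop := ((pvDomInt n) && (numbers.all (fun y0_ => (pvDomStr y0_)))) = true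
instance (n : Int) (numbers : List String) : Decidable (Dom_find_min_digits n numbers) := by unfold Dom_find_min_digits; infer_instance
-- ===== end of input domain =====

-- B replaces A's linear scan over suffix lengths by a binary search on the first length
-- whose distinct-suffix count reaches n (the count is monotone in the suffix length).

-- ===== PORT A =====
-- number_set = set(); for num in numbers: number_set.add(num[-k:])
def pvSuffSetA (numbers : List String) (k : Int) : PySem.Set String :=
  numbers.foldl (fun s num => PySem.Set.add s (PySem.Str.slice num (some (-k)) none)) PySem.Set.empty

-- for k in range(1, length + 1): … if len(number_set) == n: return k / return length
def pvLoopA (n : Int) (numbers : List String) (length : Int) : List Int → Int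
  | [] => length
  | k :: ks => if PySem.Set.len (pvSuffSetA numbers k) = n then k else pvLoopA n numbers length ks

def find_min_digits (n : Int) (numbers : List String) : Int :=
  match PySem.List.pyGet? numbers 0 with
  | none => 0  -- numbers[0] raises IndexError: excluded by Pre_
  | some first =>
    let length := PySem.Str.len first
    pvLoopA n numbers length (PySem.List.pyRange 1 (length + 1) 1)

-- ===== PORT B =====
-- def cnt(k): suffixes = set(); for num in numbers: suffixes.add(num[-k:]); return len(suffixes)
def pvCnt (numbers : List String) (k : Int) : Int :=
  PySem.Set.len
    (numbers.foldl (fun s num => PySem.Set.add s (PySem.Str.slice num (some (-k)) none))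
      PySem.Set.empty)

-- while lo < hi: mid = (lo + hi) // 2; if cnt(mid) >= n: hi = mid else: lo = mid + 1
def pvBS (n : Int) (numbers : List String) (lo hi : Int) : Int :=
  if _h : lo < hi then
    let mid := PySem.Int.floordiv (lo + hi) 2
    if n ≤ pvCnt numbers mid then pvBS n numbers lo mid
    else pvBS n numbers (mid + 1) hi
  else lo
termination_by (hi - lo).toNat
decreasing_by
  · have := PySem.Int.floordiv_two_mid_bounds (lo := lo) (hi := hi) (le_of_lt _h)
    have h2 : PySem.Int.floordiv (lo + hi) 2 < hi := by
      rw [PySem.Int.floordiv_lt_iff_lt_mul (by omega)]; omega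
    omega
  · have := PySem.Int.floordiv_two_mid_bounds (lo := lo) (hi := hi) (le_of_lt _h)
    omega

def find_min_digits_alt (n : Int) (numbers : List String) : Int :=
  match PySem.List.pyGet? numbers 0 with
  | none => 0  -- numbers[0] raises IndexError: excluded by Pre_
  | some first =>
    let length := PySem.Str.len first
    let lo := pvBS n numbers 1 (length + 1)
    if lo ≤ length ∧ pvCnt numbers lo = n then lo else length

-- ===== PRECONDITION & SPEC =====
-- Pre_ excludes only the empty list, on which both Pythons raise IndexError at numbers[0].
def Pre_find_min_digits (n : Int) (numbers : List String) : Prop := numbers ≠ []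
instance (n : Int) (numbers : List String) : Decidable (Pre_find_min_digits n numbers) := by
  unfold Pre_find_min_digits; infer_instance

def pvWitness_find_min_digits : Int × List String := (2, ["12", "13"])

def Spec_find_min_digits (n : Int) (numbers : List String) (out : Int) : Prop := out = find_min_digits_alt n numbers
instance (n : Int) (numbers : List String) (out : Int) : Decidable (Spec_find_min_digits n numbers out) := by unfold Spec_find_min_digits; infer_instance

-- ===== CLAIM (what is proved, stated in full; the proofs are below) =====
def Claim_equal_find_min_digits : Prop := ∀ (n : Int) (numbers : List String), Dom_find_min_digits n numbers → Pre_find_min_digits n numbers → Spec_find_min_digits n numbers (find_min_digits n numbers)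

-- ===== LEMMAS AND PROOFS =====

-- B's cnt(k) is the number of distinct length-k suffixes
theorem pvCnt_eq (numbers : List String) (k : Int) :
    pvCnt numbers k =
      ((PySem.Set.ofList
          (numbers.map (fun num => PySem.Str.slice num (some (-k)) none))).length : Int) := by
  unfold pvCnt
  rw [← PySem.Set.update_map_eq_foldl_add, PySem.Set.update_empty]
  simp [PySem.Set.len]

-- s[-k:] on the character list, for a positive Nat k
theorem pvSuffToList (s : String) (kn : Nat) (hk : 0 < kn) :
    (PySem.Str.slice s (some (-(kn:Int))) none).toList = s.toList.drop (s.toList.length - kn) := by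
  simp [PySem.Str.toList_slice]
  rw [PySem.List.slice_from_neg_natCast _ kn hk, String.length_toList]

-- the length-k suffix depends only on the length-k' suffix, for k ≤ k'
theorem suffix_comp (k k' : Int) (h1 : 1 ≤ k) (hkk : k ≤ k') (s : String) :
    PySem.Str.slice s (some (-k)) none =
      PySem.Str.slice (PySem.Str.slice s (some (-k')) none) (some (-k)) none := by
  obtain ⟨kn, rfl⟩ : ∃ m : Nat, k = (m : Int) := ⟨k.toNat, by omega⟩
  obtain ⟨kn', rfl⟩ : ∃ m : Nat, k' = (m : Int) := ⟨k'.toNat, by omega⟩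
  have hk : 0 < kn := by omega
  have hk' : 0 < kn' := by omega
  rw [← String.toList_inj]
  rw [pvSuffToList _ _ hk, pvSuffToList _ _ hk, pvSuffToList _ _ hk']
  rw [List.drop_drop, List.length_drop]
  congr 1
  omega

-- a set of images is no larger than the set of originals
theorem pvOfListMapLen (m : List String) (g : String → String) :
    (PySem.Set.ofList (m.map g)).length ≤ (PySem.Set.ofList m).length := by
  have e1 : (PySem.Set.ofList (m.map g)).toFinset = m.toFinset.image g := by
    ext x; simp [PySem.Set.mem_ofList]
  have e2 : (PySem.Set.ofList m).toFinset = m.toFinset := by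
    ext x; simp [PySem.Set.mem_ofList]
  rw [← List.toFinset_card_of_nodup (PySem.Set.nodup_ofList _),
      ← List.toFinset_card_of_nodup (PySem.Set.nodup_ofList _), e1, e2]
  exact Finset.card_image_le

-- the number of distinct suffixes is monotone in the suffix length
theorem pvCnt_mono (numbers : List String) (k k' : Int) (h1 : 1 ≤ k) (hkk : k ≤ k') :
    pvCnt numbers k ≤ pvCnt numbers k' := by
  rw [pvCnt_eq, pvCnt_eq]
  have e : numbers.map (fun num => PySem.Str.slice num (some (-k)) none)
      = (numbers.map (fun num => PySem.Str.slice num (some (-k')) none)).map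
          (fun s => PySem.Str.slice s (some (-k)) none) := by
    rw [List.map_map]
    exact List.map_congr_left (fun x _ => suffix_comp k k' h1 hkk x)
  rw [e]
  exact_mod_cast pvOfListMapLen _ _

-- A's loop returns `length` when no suffix length in the list hits the target count
theorem pvLoopA_none (n : Int) (numbers : List String) (L : Int) (ks : List Int)
    (h : ∀ k ∈ ks, PySem.Set.len (pvSuffSetA numbers k) ≠ n) :
    pvLoopA n numbers L ks = L := by
  induction ks with
  | nil => rfl
  | cons k ks ih =>
    simp only [pvLoopA, if_neg (h k (by simp))]
    exact ih (fun k hk => h k (by simp [hk]))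

-- A's loop returns the first k with count n
theorem pvLoopA_first (n : Int) (numbers : List String) (L : Int) (ks1 ks2 : List Int) (r : Int)
    (h1 : ∀ k ∈ ks1, PySem.Set.len (pvSuffSetA numbers k) ≠ n)
    (h2 : PySem.Set.len (pvSuffSetA numbers r) = n) :
    pvLoopA n numbers L (ks1 ++ r :: ks2) = r := by
  induction ks1 with
  | nil => simp only [List.nil_append, pvLoopA, if_pos h2]
  | cons k ks ih =>
    simp only [List.cons_append, pvLoopA, if_neg (h1 k (by simp))]
    exact ih (fun k hk => h1 k (by simp [hk]))

-- binary-search invariant: the result r lies in [lo,hi], every count left of r is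
-- below n, and r itself (if < hi) reaches n
theorem pvBS_spec (n : Int) (numbers : List String) (lo hi : Int)
    (h1 : 1 ≤ lo) (hlh : lo ≤ hi) :
    lo ≤ pvBS n numbers lo hi ∧ pvBS n numbers lo hi ≤ hi ∧
      (∀ j, lo ≤ j → j < pvBS n numbers lo hi → pvCnt numbers j < n) ∧
      (pvBS n numbers lo hi < hi → n ≤ pvCnt numbers (pvBS n numbers lo hi)) := by
  induction lo, hi using pvBS.induct n numbers with
  | case1 lo hi h mid hc ih =>
    have hmid := PySem.Int.floordiv_two_mid_bounds (lo := lo) (hi := hi) (le_of_lt h)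
    simp only [mid] at hc ih
    rw [pvBS, dif_pos h]
    rw [if_pos hc]
    obtain ⟨ha, hb, hcc, hd⟩ := ih h1 (by omega)
    refine ⟨ha, by omega, hcc, fun _ => ?_⟩
    rcases lt_or_eq_of_le hb with hlt | heq
    · exact hd hlt
    · rw [heq]; exact hc
  | case2 lo hi h mid hc ih =>
    have hmid := PySem.Int.floordiv_two_mid_bounds (lo := lo) (hi := hi) (le_of_lt h)
    have hmh : PySem.Int.floordiv (lo + hi) 2 < hi := by
      rw [PySem.Int.floordiv_lt_iff_lt_mul (by omega)]; omega
    simp only [mid] at hc ih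
    rw [pvBS, dif_pos h]
    rw [if_neg hc]
    obtain ⟨ha, hb, hcc, hd⟩ := ih (by omega) (by omega)
    refine ⟨by omega, hb, fun j hj hjr => ?_, hd⟩
    by_cases hjm : j ≤ PySem.Int.floordiv (lo + hi) 2
    · have := pvCnt_mono numbers j (PySem.Int.floordiv (lo + hi) 2) (by omega) hjm
      omega
    · exact hcc j (by omega) hjr
  | case3 lo hi h =>
    rw [pvBS, dif_neg h]
    exact ⟨le_refl _, hlh, fun j hj hj2 => absurd (lt_of_le_of_lt hj hj2) (lt_irrefl _),
      fun hlt => absurd hlt h⟩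

-- ===== VERDICT (by name: the statement is the Claim_ definition above) =====
theorem find_min_digits_spec : Claim_equal_find_min_digits := by
  intro n numbers _ hpre
  unfold Pre_find_min_digits at hpre
  unfold Spec_find_min_digits
  obtain ⟨first, rest, rfl⟩ := List.exists_cons_of_ne_nil hpre
  unfold find_min_digits find_min_digits_alt
  simp only [PySem.List.pyGet?_zero_cons]
  have hL : 0 ≤ PySem.Str.len first := by
    rw [PySem.Str.len_eq]; exact Int.natCast_nonneg _
  set L := PySem.Str.len first with hLdef
  set r := pvBS n (first :: rest) 1 (L + 1) with hr
  obtain ⟨h1r, h2r, h3r, h4r⟩ := pvBS_spec n (first :: rest) 1 (L + 1) (le_refl 1) (by omega)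
  rw [← hr] at h1r h2r h3r h4r
  have cntEq : ∀ k : Int, PySem.Set.len (pvSuffSetA (first :: rest) k) = pvCnt (first :: rest) k :=
    fun k => rfl
  by_cases hcase : r ≤ L ∧ pvCnt (first :: rest) r = n
  · rw [if_pos hcase]
    rw [PySem.List.pyRange_one_append 1 r (L + 1) (by omega) (by omega),
        PySem.List.pyRange_one_cons (show r < L + 1 by omega)]
    apply pvLoopA_first
    · intro k hk
      rw [PySem.List.mem_pyRange_one] at hk
      rw [cntEq]
      have := h3r k hk.1 hk.2
      omega
    · rw [cntEq]; exact hcase.2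
  · rw [if_neg hcase]
    apply pvLoopA_none
    intro k hk
    rw [PySem.List.mem_pyRange_one] at hk
    rw [cntEq]
    by_cases hkr : k < r
    · have := h3r k hk.1 hkr; omega
    · have hge := h4r (by omega)
      have hne : pvCnt (first :: rest) r ≠ n := fun he => hcase ⟨by omega, he⟩
      have := pvCnt_mono (first :: rest) r k (by omega) (by omega)
      omega
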